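-- pv_equiv track=rewrite | github.com/okmd/leetcode | stackqueues/max-sum-of-all-substring-of-size-k.py | max_sum_subarray_brute
-- ===== SOURCE A (Python) =====
-- def max_sum_subarray_brute(arr, k):
--     # O(n**2)
--     mx_sums = []
--     for i in range(len(arr)-k+1):
--         sm = 0
--         for j in range(i, i+k):
--             sm += arr[j]
--         mx_sums.append(sm)
--     return mx_sums
-- ===== SOURCE B (Python) =====
-- def max_sum_subarray_brute(arr, k):
--     # Prefix sums once, then each window sum is a difference of two prefixes.
--     prefix = [0]
--     for x in arr:
--         prefix.append(prefix[-1] + x)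
--     return [prefix[i + k] - prefix[i] for i in range(len(arr) - k + 1)]
-- ===== Notes on version B (the rewrite author's own statement) =====
-- stated objective: faster
-- what changed: Replaces A's nested per-window summation with a single prefix-sum pass, each window sum becoming a difference of two prefixes; Pre_ excludes negative k, on which A's list of n-k+1 zeros is an accident of the empty inner range (a negative window size is outside the natural domain) and B raises there.
-- outside the precondition, e.g. on max_sum_subarray_brute([1, 2], -1): A returns [0, 0, 0, 0], B raises IndexError
import Mathlib
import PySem

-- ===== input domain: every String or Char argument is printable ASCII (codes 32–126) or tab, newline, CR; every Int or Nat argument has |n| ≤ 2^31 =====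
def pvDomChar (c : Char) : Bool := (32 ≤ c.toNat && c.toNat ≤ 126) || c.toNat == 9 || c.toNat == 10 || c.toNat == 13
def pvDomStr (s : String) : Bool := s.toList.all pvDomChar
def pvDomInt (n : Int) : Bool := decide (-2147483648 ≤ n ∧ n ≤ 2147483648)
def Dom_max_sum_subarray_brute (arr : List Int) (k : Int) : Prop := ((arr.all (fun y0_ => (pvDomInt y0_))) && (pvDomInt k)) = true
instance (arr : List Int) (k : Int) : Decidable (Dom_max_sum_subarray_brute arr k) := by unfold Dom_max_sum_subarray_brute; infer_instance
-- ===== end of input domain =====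

-- B computes all size-k window sums via one pfx-sum pass instead of A's per-window inner loop; objective: faster.

-- ===== PORT A =====
def max_sum_subarray_brute (arr : List Int) (k : Int) : List Int :=
  (PySem.List.pyRange 0 ((arr.length : Int) - k + 1) 1).foldl
    (fun mx_sums i =>
      let sm : Int := (PySem.List.pyRange i (i + k) 1).foldl
        (fun sm j => sm + PySem.List.pyGetD arr j 0) 0   -- arr[j]: always in range here, so getD is exact
      mx_sums ++ [sm]) []

-- ===== PORT B =====
def max_sum_subarray_brute_alt (arr : List Int) (k : Int) : List Int :=
  let pfx : List Int := arr.foldl (fun p x => p ++ [PySem.List.pyGetD p (-1) 0 + x]) [0]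
  -- pfx[i+k] / pfx[i]: in range whenever 0 ≤ k (= Pre_), so getD is exact there
  (PySem.List.pyRange 0 ((arr.length : Int) - k + 1) 1).map
    (fun i => PySem.List.pyGetD pfx (i + k) 0 - PySem.List.pyGetD pfx i 0)

-- ===== PRECONDITION & SPEC =====
-- Pre_ excludes k < 0: a negative window size is outside the natural domain; there A's
-- value ([0]*(n-k+1), from the empty inner range) is accidental and B raises IndexError.
def Pre_max_sum_subarray_brute (arr : List Int) (k : Int) : Prop := 0 ≤ k
instance (arr : List Int) (k : Int) : Decidable (Pre_max_sum_subarray_brute arr k) := by unfold Pre_max_sum_subarray_brute; infer_instance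
def pvWitness_max_sum_subarray_brute : List Int × Int := ([1, 2, 3], 2)

def Spec_max_sum_subarray_brute (arr : List Int) (k : Int) (out : List Int) : Prop := out = max_sum_subarray_brute_alt arr k
instance (arr : List Int) (k : Int) (out : List Int) : Decidable (Spec_max_sum_subarray_brute arr k out) := by unfold Spec_max_sum_subarray_brute; infer_instance

-- ===== CLAIM (what is proved, stated in full; the proofs are below) =====
def Claim_equal_max_sum_subarray_brute : Prop := ∀ (arr : List Int) (k : Int), Dom_max_sum_subarray_brute arr k → Pre_max_sum_subarray_brute arr k → Spec_max_sum_subarray_brute arr k (max_sum_subarray_brute arr k)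

-- ===== LEMMAS AND PROOFS =====

/-- The window sum both programs compute: sum of `arr[t : t+k]`. -/
def pvWin (arr : List Int) (k : Int) (t : Nat) : Int := ((arr.drop t).take k.toNat).sum

theorem pv_win_S (arr : List Int) (K m : Nat) :
    ((arr.drop m).take K).sum = (arr.take (m+K)).sum - (arr.take m).sum := by
  conv_rhs => rw [← List.take_append_drop m (arr.take (m+K))]
  rw [List.sum_append, List.take_take, List.drop_take,
      Nat.min_eq_left (Nat.le_add_right m K), Nat.add_sub_cancel_left]
  ring

/-- A's inner loop computes the window sum, given the window fits. -/
theorem pv_inner_eq (arr : List Int) (k : Int) (t : Nat)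
    (ht : (t:Int) + k ≤ arr.length) :
    (PySem.List.pyRange (t:Int) ((t:Int) + k) 1).foldl
        (fun sm j => sm + PySem.List.pyGetD arr j 0) 0 = pvWin arr k t := by
  by_cases hk : k ≤ 0
  · rw [PySem.List.pyRange_one_eq_nil (by omega)]
    simp [pvWin, Int.toNat_of_nonpos hk]
  · rw [PySem.List.foldl_add _ (fun j => PySem.List.pyGetD arr j 0) 0]
    have hfull : (PySem.List.pyRange (t:Int) (arr.length:Int)).map
        (fun j => PySem.List.pyGetD arr j 0) = arr.drop t := by
      simpa using PySem.List.map_pyGetD_pyRange' arr 0 (a := (t:Int)) (by omega)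
    rw [PySem.List.pyRange_one_append (t:Int) ((t:Int)+k) (arr.length:Int) (by omega) ht,
        List.map_append] at hfull
    have hlen : ((PySem.List.pyRange (t:Int) ((t:Int)+k)).map
        (fun j => PySem.List.pyGetD arr j 0)).length = k.toNat := by
      simp [PySem.List.length_pyRange_one]
    have hpref := congrArg (List.take k.toNat) hfull
    rw [List.take_left' hlen] at hpref
    rw [hpref]
    simp [pvWin]

/-- A in closed form: the list of all window sums. -/
theorem pv_A_eq (arr : List Int) (k : Int) :
    max_sum_subarray_brute arr k
      = (List.range ((arr.length:Int) - k + 1).toNat).map (pvWin arr k) := by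
  simp only [max_sum_subarray_brute]
  rw [PySem.List.foldl_append_singleton_eq_map
        (fun i => (PySem.List.pyRange i (i + k) 1).foldl
          (fun sm j => sm + PySem.List.pyGetD arr j 0) 0),
      PySem.List.pyRange_one, List.map_map, List.nil_append,
      show ((arr.length:Int) - k + 1 - 0) = ((arr.length:Int) - k + 1) by ring]
  refine List.map_congr_left (fun t htm => ?_)
  rw [List.mem_range] at htm
  simp only [Function.comp, zero_add]
  exact pv_inner_eq arr k t (by omega)

/-- B's pfx-sum loop builds exactly the list of pfx sums. -/
theorem pv_pfx_eq (arr : List Int) :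
    arr.foldl (fun p x => p ++ [PySem.List.pyGetD p (-1) 0 + x]) [0]
      = (List.range (arr.length + 1)).map (fun j => (arr.take j).sum) := by
  induction arr using List.reverseRecOn with
  | nil => simp
  | append_singleton as x ih =>
    rw [List.foldl_append, ih, List.foldl_cons, List.foldl_nil]
    have hlast : PySem.List.pyGetD
        ((List.range (as.length + 1)).map (fun j => (as.take j).sum)) (-1) 0 = as.sum := by
      rw [List.range_succ, List.map_append, List.map_singleton,
          PySem.List.pyGetD_neg_one_append_singleton]
      simp
    have hR : (List.range ((as ++ [x]).length + 1)).map (fun j => ((as ++ [x]).take j).sum)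
        = (List.range (as.length + 1)).map (fun j => ((as ++ [x]).take j).sum)
          ++ [((as ++ [x]).take (as.length + 1)).sum] := by
      rw [List.length_append, List.length_singleton, List.range_succ, List.map_append,
          List.map_singleton]
    rw [hlast, hR]
    congr 1
    · refine List.map_congr_left (fun j hj => ?_)
      rw [List.mem_range] at hj
      rw [List.take_append_of_le_length (by omega)]
    · rw [show as.length + 1 = (as ++ [x]).length by simp, List.take_length]
      simp

-- ===== VERDICT (by name: the statement is the Claim_ definition above) =====
theorem max_sum_subarray_brute_spec : Claim_equal_max_sum_subarray_brute := by
  intro arr k _ hk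
  unfold Spec_max_sum_subarray_brute
  rw [pv_A_eq]
  simp only [max_sum_subarray_brute_alt]
  rw [pv_pfx_eq, PySem.List.pyRange_one, List.map_map,
      show ((arr.length:Int) - k + 1 - 0) = ((arr.length:Int) - k + 1) by ring]
  refine List.map_congr_left (fun t htm => ?_)
  rw [List.mem_range] at htm
  simp only [Function.comp, zero_add]
  have hk0 : (0:Int) ≤ k := hk
  set K := k.toNat with hK
  have hkK : (K:Int) = k := Int.toNat_of_nonneg hk0
  have ht : t + K ≤ arr.length := by omega
  have e1 : PySem.List.pyGetD
      ((List.range (arr.length + 1)).map (fun j => (arr.take j).sum)) ((t:Int) + k) 0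
      = (arr.take (t + K)).sum := by
    rw [← hkK, show ((t:Int) + (K:Int)) = ((t + K : Nat) : Int) by push_cast; ring,
        PySem.List.pyGetD_natCast, List.getD_eq_getElem?_getD, List.getElem?_map,
        List.getElem?_range (by omega)]
    simp
  have e2 : PySem.List.pyGetD
      ((List.range (arr.length + 1)).map (fun j => (arr.take j).sum)) ((t:Int)) 0
      = (arr.take t).sum := by
    rw [PySem.List.pyGetD_natCast, List.getD_eq_getElem?_getD, List.getElem?_map,
        List.getElem?_range (by omega)]
    simp
  rw [e1, e2, pvWin, ← hK, pv_win_S]
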